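-- pv_equiv track=rewrite | github.com/sudog1/Algorithm | 프로그래머스/3/214288. 상담원 인원/상담원 인원.py | solution
-- ===== SOURCE A (Python) =====
-- import heapq
--
-- def get_standby_time(arr, m):
--     standby_time = 0
--     state_queue = []
--     for a, b in arr:
--         if m == 0:
--             end_time = heapq.heappop(state_queue)
--             m += 1
--             if end_time > a:
--                 standby_time += end_time - a
--                 a = end_time
--         m -= 1
--         heapq.heappush(state_queue, a+b)
--     return standby_time
--
-- def solution(k, n, reqs):
--     answer = 0
--     counsel = [[] for _ in range(k)]
--
--     for a, b, c in reqs: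
--         counsel[c-1].append([a, b])
--     standby_time_arr = [[get_standby_time(counsel[i], 1) for i in range(k)], [0]*k]
--     time_gap = []
--
--     for i in range(k):
--         if standby_time_arr[0][i] == 0:
--             continue
--         standby_time = get_standby_time(counsel[i], 2)
--         heapq.heappush(time_gap, [-(standby_time_arr[0][i] - standby_time), i, 2])
--         standby_time_arr[1][i] = standby_time
--
--     for _ in range(n-k):
--         if not time_gap:
--             break
--         _, i, m = heapq.heappop(time_gap)
--         standby_time = get_standby_time(counsel[i], m+1)
--         heapq.heappush(time_gap, [-(standby_time_arr[1][i] - standby_time), i, m+1])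
--         standby_time_arr[0][i] = standby_time_arr[1][i]
--         standby_time_arr[1][i] = standby_time
--
--     return sum(standby_time_arr[0])
-- ===== SOURCE B (Python) =====
-- def get_standby_time(arr, m):
--     # multiset of end times kept as a plain list; when full, take min and reuse
--     standby = 0
--     ends = []
--     for a, b in arr:
--         if len(ends) == m:
--             t = min(ends)
--             ends.remove(t)
--             if t > a:
--                 standby += t - a
--                 a = t
--         ends.append(a + b)
--     return standby
--
--
-- def solution(k, n, reqs):
--     counsel = [[] for _ in range(k)]
--     for a, b, c in reqs:
--         counsel[c - 1].append([a, b])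
--     cur = [get_standby_time(counsel[i], 1) for i in range(k)]
--     nxt = [0 if cur[i] == 0 else get_standby_time(counsel[i], 2) for i in range(k)]
--     cnt = [2] * k
--     active = [i for i in range(k) if cur[i] > 0]
--     for _ in range(n - k):
--         if not active:
--             break
--         best = min(active, key=lambda i: (-(cur[i] - nxt[i]), i))
--         cur[best] = nxt[best]
--         cnt[best] += 1
--         nxt[best] = get_standby_time(counsel[best], cnt[best])
--     return sum(cur)
-- ===== Notes on version B (the rewrite author's own statement) =====
-- stated objective: simpler
-- what changed: B drops both heapq priority queues of A: get_standby_time keeps the busy counselors' end times in a plain list consumed with min()/remove(), and the greedy allocation replaces A's lazily-updated marginal-gain heap with double-buffered standby arrays by a per-step argmin scan over the active types with explicit cur/nxt/cnt arrays.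
import Mathlib
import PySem

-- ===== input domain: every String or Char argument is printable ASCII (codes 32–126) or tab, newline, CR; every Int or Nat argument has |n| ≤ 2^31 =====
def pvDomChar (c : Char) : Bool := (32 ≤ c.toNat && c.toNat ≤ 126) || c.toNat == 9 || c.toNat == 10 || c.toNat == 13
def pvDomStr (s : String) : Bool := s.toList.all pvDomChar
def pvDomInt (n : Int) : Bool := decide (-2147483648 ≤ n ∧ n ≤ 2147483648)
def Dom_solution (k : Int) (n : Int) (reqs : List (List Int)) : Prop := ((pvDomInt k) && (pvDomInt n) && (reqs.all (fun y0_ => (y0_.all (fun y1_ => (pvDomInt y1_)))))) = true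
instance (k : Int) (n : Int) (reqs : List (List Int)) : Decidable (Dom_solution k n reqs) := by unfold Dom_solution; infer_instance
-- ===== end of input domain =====

-- B replaces both heapq priority queues of A by plain lists scanned with min (and a per-step
-- argmin scan instead of the lazy marginal-gain heap with its double-buffered standby array):
-- objective 'simpler'.  The heapq calls of A are ported as a sorted-list priority queue
-- (ordered insert / pop head); this is exact for A because only the pop-min order of a heap
-- is observable in A's result.

-- ===== PORT A =====

-- ordered insert into a list sorted by `le` (the priority-queue model of heappush)
def insortBy {α : Type} (le : α → α → Bool) : List α → α → List α
  | [], x => [x]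
  | y :: ys, x => if le y x then y :: insortBy le ys x else x :: y :: ys

def intLE (x y : Int) : Bool := decide (x ≤ y)

-- lexicographic comparison of the heap entries [-gap, i, m] (Python list comparison on length-3 int lists)
def entryLE (x y : Int × Nat × Int) : Bool :=
  decide (x.1 < y.1) || (decide (x.1 = y.1) &&
    (decide (x.2.1 < y.2.1) || (decide (x.2.1 = y.2.1) && decide (x.2.2 ≤ y.2.2))))

-- shared bucketing phase: both Source A and Source B contain the identical two lines
-- `for a, b, c in reqs: counsel[c-1].append([a, b])`
def buildCounsel (k : Int) (reqs : List (List Int)) : List (List (Int × Int)) :=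
  reqs.foldl (fun counsel row =>
    match row with
    | [a, b, c] =>
        PySem.List.pySetD counsel (c - 1) ((PySem.List.pyGetD counsel (c - 1) []) ++ [(a, b)])
    | _ => counsel   -- Python: ValueError on unpacking; excluded by Pre_solution
    ) (List.replicate k.toNat [])

-- one iteration of A's get_standby_time loop; state = (standby_time, state_queue sorted asc, m)
def gstStepA (st : Int × List Int × Int) (ab : Int × Int) : Int × List Int × Int :=
  if st.2.2 = 0 then
    match st.2.1 with
    | [] => st   -- Python: heappop of empty heap raises IndexError (reachable only for m ≤ 0, never from solution)
    | e :: q' =>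
      if e > ab.1 then (st.1 + (e - ab.1), insortBy intLE q' (e + ab.2), 0)
      else (st.1, insortBy intLE q' (ab.1 + ab.2), 0)
  else (st.1, insortBy intLE st.2.1 (ab.1 + ab.2), st.2.2 - 1)

def gstA (arr : List (Int × Int)) (m : Int) : Int :=
  (arr.foldl gstStepA (0, [], m)).1

-- the `for _ in range(n-k)` loop of A; heap entries (g, i, m) kept as a list sorted by entryLE
def loopA (c : List (List (Int × Int))) :
    Nat → List (Int × Nat × Int) → List Int → List Int →
    List (Int × Nat × Int) × List Int × List Int
  | 0, tg, st0, st1 => (tg, st0, st1)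
  | f + 1, tg, st0, st1 =>
    match tg with
    | [] => (tg, st0, st1)   -- `if not time_gap: break`
    | (_, i, m) :: tg' =>
      let s := gstA (c.getD i []) (m + 1)
      loopA c f (insortBy entryLE tg' (-(st1.getD i 0 - s), i, m + 1))
        (st0.set i (st1.getD i 0)) (st1.set i s)

-- one step of the loop building time_gap and standby_time_arr[1]
def initStepA (c : List (List (Int × Int))) (st0 : List Int)
    (p : List (Int × Nat × Int) × List Int) (i : Nat) : List (Int × Nat × Int) × List Int :=
  if st0.getD i 0 = 0 then p
  else
    let s := gstA (c.getD i []) 2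
    (insortBy entryLE p.1 (-(st0.getD i 0 - s), i, 2), p.2.set i s)

def solution (k : Int) (n : Int) (reqs : List (List Int)) : Int :=
  let counsel := buildCounsel k reqs
  let st0 := (List.range k.toNat).map (fun i => gstA (counsel.getD i []) 1)
  let p := (List.range k.toNat).foldl (initStepA counsel st0) ([], List.replicate k.toNat 0)
  (loopA counsel (n - k).toNat p.1 st0 p.2).2.1.sum

-- ===== PORT B =====

-- one iteration of B's get_standby_time loop; state = (standby, ends as a plain list)
def gstStepB (m : Int) (st : Int × List Int) (ab : Int × Int) : Int × List Int :=
  if (st.2.length : Int) = m then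
    match PySem.List.min? st.2 (fun x => x) with
    | none => st   -- Python: min([]) raises ValueError (reachable only for m = 0, never from solution)
    | some t =>
      let ends := (PySem.List.remove? st.2 t).getD st.2
      if t > ab.1 then (st.1 + (t - ab.1), ends ++ [t + ab.2])
      else (st.1, ends ++ [ab.1 + ab.2])
  else (st.1, st.2 ++ [ab.1 + ab.2])

def gstB (arr : List (Int × Int)) (m : Int) : Int :=
  (arr.foldl (gstStepB m) (0, [])).1

-- B's greedy loop: each step an argmin scan over the active types (min with a tuple key)
def loopB (c : List (List (Int × Int))) :
    Nat → List Nat → List Int → List Int → List Int →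
    List Int × List Int × List Int
  | 0, _, cur, nxt, cnt => (cur, nxt, cnt)
  | f + 1, active, cur, nxt, cnt =>
    match PySem.List.min2? active (fun i => -(cur.getD i 0 - nxt.getD i 0)) (fun i => i) with
    | none => (cur, nxt, cnt)   -- `if not active: break`
    | some b =>
      loopB c f active (cur.set b (nxt.getD b 0))
        (nxt.set b (gstB (c.getD b []) (cnt.getD b 0 + 1)))
        (cnt.set b (cnt.getD b 0 + 1))

def solution_alt (k : Int) (n : Int) (reqs : List (List Int)) : Int :=
  let counsel := buildCounsel k reqs
  let cur := (List.range k.toNat).map (fun i => gstB (counsel.getD i []) 1)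
  let nxt := (List.range k.toNat).map (fun i =>
      if cur.getD i 0 = 0 then 0 else gstB (counsel.getD i []) 2)
  let active := (List.range k.toNat).filter (fun i => decide (0 < cur.getD i 0))
  (loopB counsel (n - k).toNat active cur nxt (List.replicate k.toNat 2)).1.sum

-- ===== PRECONDITION & SPEC =====
-- Pre_ excludes exactly the inputs where Python A raises: a row of reqs that is not a triple
-- (ValueError on unpacking) or whose type c is outside the valid Python index range for
-- counsel[c-1] (IndexError).
def Pre_solution (k : Int) (n : Int) (reqs : List (List Int)) : Prop :=
  ∀ row ∈ reqs, row.length = 3 ∧ -k ≤ row.getD 2 0 - 1 ∧ row.getD 2 0 - 1 < k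
instance (k : Int) (n : Int) (reqs : List (List Int)) : Decidable (Pre_solution k n reqs) := by
  unfold Pre_solution; infer_instance

def pvWitness_solution : Int × Int × List (List Int) :=
  (2, 3, [[0, 5, 1], [1, 3, 1], [0, 4, 2]])

def Spec_solution (k : Int) (n : Int) (reqs : List (List Int)) (out : Int) : Prop := out = solution_alt k n reqs
instance (k : Int) (n : Int) (reqs : List (List Int)) (out : Int) : Decidable (Spec_solution k n reqs out) := by unfold Spec_solution; infer_instance

-- ===== CLAIM (what is proved, stated in full; the proofs are below) =====
def Claim_equal_solution : Prop := ∀ (k : Int) (n : Int) (reqs : List (List Int)), Dom_solution k n reqs → Pre_solution k n reqs → Spec_solution k n reqs (solution k n reqs)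

-- ===== LEMMAS AND PROOFS =====

-- ---- generic ordered-insert lemmas ----
theorem insortBy_perm {α : Type} (le : α → α → Bool) (l : List α) (x : α) :
    (insortBy le l x).Perm (x :: l) := by
  induction l with
  | nil => exact List.Perm.refl _
  | cons y ys ih =>
    simp only [insortBy]
    split
    · exact (ih.cons y).trans (List.Perm.swap x y ys)
    · exact List.Perm.refl _

theorem mem_insortBy {α : Type} (le : α → α → Bool) (l : List α) (x a : α) :
    a ∈ insortBy le l x ↔ a = x ∨ a ∈ l := by
  rw [(insortBy_perm le l x).mem_iff, List.mem_cons]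

theorem length_insortBy {α : Type} (le : α → α → Bool) (l : List α) (x : α) :
    (insortBy le l x).length = l.length + 1 :=
  (insortBy_perm le l x).length_eq

theorem insortBy_pairwise {α : Type} {le : α → α → Bool}
    (htrans : ∀ a b c, le a b = true → le b c = true → le a c = true)
    (htot : ∀ a b, le a b = false → le b a = true)
    {l : List α} {x : α} (hl : l.Pairwise (fun a b => le a b = true)) :
    (insortBy le l x).Pairwise (fun a b => le a b = true) := by
  induction l with
  | nil => simp [insortBy]
  | cons y ys ih =>
    rw [List.pairwise_cons] at hl
    obtain ⟨hy, hys⟩ := hl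
    simp only [insortBy]
    split
    next h =>
      rw [List.pairwise_cons]
      refine ⟨fun a ha => ?_, ih hys⟩
      rcases (mem_insortBy le ys x a).1 ha with rfl | ha
      · exact h
      · exact hy a ha
    next h =>
      have hxy : le x y = true := htot y x (by simpa using h)
      rw [List.pairwise_cons]
      refine ⟨fun a ha => ?_, List.pairwise_cons.2 ⟨hy, hys⟩⟩
      rcases List.mem_cons.1 ha with rfl | ha
      · exact hxy
      · exact htrans x y a hxy (hy a ha)

theorem pairwise_head_le {α : Type} {le : α → α → Bool}
    (hrefl : ∀ a, le a a = true) {x : α} {t : List α}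
    (h : (x :: t).Pairwise (fun a b => le a b = true)) :
    ∀ a ∈ x :: t, le x a = true := by
  intro a ha
  rcases List.mem_cons.1 ha with rfl | ha
  · exact hrefl a
  · exact (List.pairwise_cons.1 h).1 a ha

-- ---- entryLE is a linear order ----
theorem entryLE_refl (a : Int × Nat × Int) : entryLE a a = true := by
  simp [entryLE]

theorem entryLE_trans (a b c : Int × Nat × Int)
    (h1 : entryLE a b = true) (h2 : entryLE b c = true) : entryLE a c = true := by
  simp only [entryLE, Bool.or_eq_true, Bool.and_eq_true, decide_eq_true_eq] at *
  omega

theorem entryLE_total (a b : Int × Nat × Int) (h : entryLE a b = false) :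
    entryLE b a = true := by
  simp only [entryLE, Bool.or_eq_false_iff, Bool.or_eq_true, Bool.and_eq_false_iff,
    Bool.and_eq_true, decide_eq_true_eq, decide_eq_false_iff_not] at *
  omega

theorem entryLE_antisymm (a b : Int × Nat × Int)
    (h1 : entryLE a b = true) (h2 : entryLE b a = true) : a = b := by
  obtain ⟨a1, a2, a3⟩ := a
  obtain ⟨b1, b2, b3⟩ := b
  simp only [entryLE, Bool.or_eq_true, Bool.and_eq_true, decide_eq_true_eq] at *
  refine Prod.ext ?_ (Prod.ext ?_ ?_) <;> simp <;> omega

-- ---- inner loop: A's heap of end times vs B's plain list ----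
def InvG (m : Int) (sA : Int × List Int × Int) (sB : Int × List Int) : Prop :=
  sA.1 = sB.1 ∧ sA.2.1.Perm sB.2 ∧ sA.2.1.Pairwise (fun a b => intLE a b = true) ∧
  sA.2.2 = m - sA.2.1.length ∧ (sA.2.1.length : Int) ≤ m

theorem intLE_trans (a b c : Int) (h1 : intLE a b = true) (h2 : intLE b c = true) :
    intLE a c = true := by simp only [intLE, decide_eq_true_eq] at *; omega

theorem intLE_total (a b : Int) (h : intLE a b = false) : intLE b a = true := by
  simp only [intLE, decide_eq_true_eq, decide_eq_false_iff_not] at *; omega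

theorem invG_step (m : Int) (hm : 1 ≤ m) (sA : Int × List Int × Int) (sB : Int × List Int)
    (ab : Int × Int) (h : InvG m sA sB) :
    InvG m (gstStepA sA ab) (gstStepB m sB ab) := by
  obtain ⟨sa, q, mm⟩ := sA
  obtain ⟨sb, ends⟩ := sB
  obtain ⟨a, b⟩ := ab
  obtain ⟨h1, hperm, hsort, hmm, hlen⟩ := h
  simp only at h1 hperm hsort hmm hlen
  subst h1
  by_cases hfull : mm = 0
  · have hlq : (q.length : Int) = m := by omega
    have hlq' : (ends.length : Int) = m := by rw [← hperm.length_eq]; exact hlq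
    obtain ⟨e, q', rfl⟩ : ∃ e q', q = e :: q' := by
      cases q with
      | nil => simp at hlq; omega
      | cons e q' => exact ⟨e, q', rfl⟩
    have hene : ends ≠ [] := by
      intro hc; subst hc; simp at hlq'; omega
    obtain ⟨t, ht⟩ : ∃ t, PySem.List.min? ends (fun x => x) = some t := by
      cases hmin : PySem.List.min? ends (fun x => x) with
      | none => exact absurd ((PySem.List.min?_eq_none_iff ends (fun x => x)).1 hmin) hene
      | some t => exact ⟨t, rfl⟩
    have htm : t ∈ ends := PySem.List.min?_mem ht
    have hte : t = e := by
      apply le_antisymm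
      · exact PySem.List.min?_isMin ht e (hperm.mem_iff.1 (List.mem_cons_self))
      · have htq : t ∈ e :: q' := hperm.mem_iff.2 htm
        rcases List.mem_cons.1 htq with rfl | hq
        · exact le_refl _
        · have := (List.pairwise_cons.1 hsort).1 t hq
          simpa [intLE] using this
    subst hte
    have hrem : (PySem.List.remove? ends t).getD ends = ends.erase t := by
      rw [PySem.List.remove?_eq_some_erase ends t htm]; rfl
    have hperm' : q'.Perm (ends.erase t) := by
      have := hperm.erase t
      simpa using this
    have hsort' : q'.Pairwise (fun a b => intLE a b = true) := (List.pairwise_cons.1 hsort).2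
    have hpush : ∀ v : Int, (insortBy intLE q' v).Perm (ends.erase t ++ [v]) := fun v =>
      (insortBy_perm intLE q' v).trans ((hperm'.cons v).trans (List.perm_append_singleton v _).symm)
    have hlen' : ∀ v : Int, ((insortBy intLE q' v).length : Int) = m := by
      intro v; rw [length_insortBy]; simp at hlq ⊢; omega
    unfold InvG
    simp only [gstStepA, gstStepB, hfull, hlq', ht, hrem, if_pos rfl]
    by_cases hgt : t > a
    · simp only [if_pos hgt]
      refine ⟨rfl, hpush _, insortBy_pairwise intLE_trans intLE_total hsort', ?_, ?_⟩
      · show (0 : Int) = m - ((insortBy intLE q' (t + b)).length : Int)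
        rw [hlen' (t + b)]; omega
      · show ((insortBy intLE q' (t + b)).length : Int) ≤ m
        rw [hlen' (t + b)]
    · simp only [if_neg hgt]
      refine ⟨rfl, hpush _, insortBy_pairwise intLE_trans intLE_total hsort', ?_, ?_⟩
      · show (0 : Int) = m - ((insortBy intLE q' (a + b)).length : Int)
        rw [hlen' (a + b)]; omega
      · show ((insortBy intLE q' (a + b)).length : Int) ≤ m
        rw [hlen' (a + b)]
  · have hlq : (q.length : Int) < m := by omega
    have hlq' : ¬ ((ends.length : Int) = m) := by rw [← hperm.length_eq]; omega
    simp only [gstStepA, gstStepB, if_neg hfull, if_neg hlq', InvG]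
    refine ⟨trivial, ?_, insortBy_pairwise intLE_trans intLE_total hsort, ?_, ?_⟩
    · exact (insortBy_perm intLE q (a + b)).trans
        ((hperm.cons (a + b)).trans (List.perm_append_singleton (a + b) ends).symm)
    · rw [length_insortBy]; push_cast; omega
    · rw [length_insortBy]; push_cast; omega

theorem invG_fold (m : Int) (hm : 1 ≤ m) (arr : List (Int × Int)) :
    ∀ (sA : Int × List Int × Int) (sB : Int × List Int), InvG m sA sB →
      InvG m (arr.foldl gstStepA sA) (arr.foldl (gstStepB m) sB) := by
  induction arr with
  | nil => intro sA sB h; exact h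
  | cons ab arr ih => intro sA sB h; exact ih _ _ (invG_step m hm sA sB ab h)

theorem gstA_eq_gstB (arr : List (Int × Int)) (m : Int) (hm : 1 ≤ m) :
    gstA arr m = gstB arr m := by
  have h := invG_fold m hm arr (0, [], m) (0, [])
    ⟨rfl, List.Perm.refl _, List.Pairwise.nil, by simp, by simpa using by omega⟩
  exact h.1

theorem gstStepB_mono (m : Int) (s : Int × List Int) (ab : Int × Int) :
    s.1 ≤ (gstStepB m s ab).1 := by
  unfold gstStepB
  split
  · cases hmin : PySem.List.min? s.2 (fun x => x) with
    | none => simp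
    | some t =>
      simp only
      split
      next hgt => simp only; omega
      next hgt => simp
  · simp

theorem foldB_mono (m : Int) (arr : List (Int × Int)) :
    ∀ s : Int × List Int, s.1 ≤ (arr.foldl (gstStepB m) s).1 := by
  induction arr with
  | nil => intro s; exact le_refl _
  | cons ab arr ih =>
    intro s
    exact le_trans (gstStepB_mono m s ab) (ih _)

theorem gstB_nonneg (arr : List (Int × Int)) (m : Int) : 0 ≤ gstB arr m :=
  foldB_mono m arr (0, [])

-- ---- getD/set helpers ----
theorem getD_set_self {l : List Int} {b : Nat} (h : b < l.length) (v : Int) :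
    (l.set b v).getD b 0 = v := by
  simp [List.getD_eq_getElem?_getD, List.getElem?_set, h]

theorem getD_set_ne {l : List Int} {b j : Nat} (h : j ≠ b) (v : Int) :
    (l.set b v).getD j 0 = l.getD j 0 := by
  simp [List.getD_eq_getElem?_getD, Ne.symm h]

theorem getD_map_range {K : Nat} (f : Nat → Int) {j : Nat} (h : j < K) :
    (((List.range K).map f).getD j 0) = f j := by
  rw [List.getD_eq_getElem?_getD]
  simp [List.getElem?_map, List.getElem?_range h]

-- ---- min2? characterisation (Python min with a tuple key) ----
def le2 (k1 : Nat → Int) (x y : Nat) : Prop := k1 x < k1 y ∨ (k1 x = k1 y ∧ x ≤ y)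

def m2step (k1 : Nat → Int) (acc : Option Nat) (x : Nat) : Option Nat :=
  match acc with
  | none => some x
  | some m => if (decide (k1 x < k1 m) || !decide (k1 m < k1 x) && decide (x < m)) then some x else some m

theorem min2?_eq_foldl (k1 : Nat → Int) (l : List Nat) :
    PySem.List.min2? l k1 (fun i => i) = l.foldl (m2step k1) none := by
  simp only [PySem.List.min2?]
  congr 1
  funext acc x
  cases acc <;> rfl

theorem le2_refl (k1 : Nat → Int) (x : Nat) : le2 k1 x x := Or.inr ⟨rfl, le_refl x⟩

theorem le2_trans {k1 : Nat → Int} {x y z : Nat} (h1 : le2 k1 x y) (h2 : le2 k1 y z) :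
    le2 k1 x z := by
  unfold le2 at *; omega

theorem m2go (k1 : Nat → Int) (l : List Nat) : ∀ m : Nat,
    ∃ b, l.foldl (m2step k1) (some m) = some b ∧ (b = m ∨ b ∈ l) ∧ le2 k1 b m ∧
      ∀ j ∈ l, le2 k1 b j := by
  induction l with
  | nil => intro m; exact ⟨m, rfl, Or.inl rfl, le2_refl k1 m, by simp⟩
  | cons x t ih =>
    intro m
    rw [List.foldl_cons]
    by_cases hc : (decide (k1 x < k1 m) || !decide (k1 m < k1 x) && decide (x < m)) = true
    · have hstep : m2step k1 (some m) x = some x := by simp only [m2step, if_pos hc]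
      have hxm : le2 k1 x m := by
        simp only [Bool.or_eq_true, Bool.and_eq_true, Bool.not_eq_true',
          decide_eq_true_eq, decide_eq_false_iff_not] at hc
        unfold le2; omega
      obtain ⟨b, hb, hmem, hle, hall⟩ := ih x
      rw [hstep]
      refine ⟨b, hb, ?_, le2_trans hle hxm, ?_⟩
      · rcases hmem with rfl | hmm
        · exact Or.inr (List.mem_cons_self)
        · exact Or.inr (List.mem_cons_of_mem x hmm)
      · intro j hj
        rcases List.mem_cons.1 hj with rfl | hj
        · exact hle
        · exact hall j hj
    · have hstep : m2step k1 (some m) x = some m := by simp only [m2step, if_neg hc]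
      have hmx : le2 k1 m x := by
        simp only [Bool.or_eq_true, Bool.and_eq_true, Bool.not_eq_true',
          decide_eq_true_eq, decide_eq_false_iff_not] at hc
        unfold le2; omega
      obtain ⟨b, hb, hmem, hle, hall⟩ := ih m
      rw [hstep]
      refine ⟨b, hb, ?_, hle, ?_⟩
      · rcases hmem with rfl | hmm
        · exact Or.inl rfl
        · exact Or.inr (List.mem_cons_of_mem x hmm)
      · intro j hj
        rcases List.mem_cons.1 hj with rfl | hj
        · exact le2_trans hle hmx
        · exact hall j hj

theorem min2?_spec (k1 : Nat → Int) (l : List Nat) (b : Nat)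
    (h : PySem.List.min2? l k1 (fun i => i) = some b) :
    b ∈ l ∧ ∀ j ∈ l, le2 k1 b j := by
  rw [min2?_eq_foldl] at h
  cases l with
  | nil => exact absurd h (by simp)
  | cons x t =>
    rw [List.foldl_cons] at h
    have hstep : m2step k1 none x = some x := rfl
    rw [hstep] at h
    obtain ⟨b', hb', hmem, hle, hall⟩ := m2go k1 t x
    rw [hb'] at h
    cases h
    constructor
    · rcases hmem with rfl | hmm
      · exact List.mem_cons_self
      · exact List.mem_cons_of_mem x hmm
    · intro j hj
      rcases List.mem_cons.1 hj with rfl | hj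
      · exact hle
      · exact hall j hj

theorem min2?_none_iff (k1 : Nat → Int) (l : List Nat) :
    PySem.List.min2? l k1 (fun i => i) = none ↔ l = [] := by
  constructor
  · intro h
    cases l with
    | nil => rfl
    | cons x t =>
      rw [min2?_eq_foldl, List.foldl_cons] at h
      have hstep : m2step k1 none x = some x := rfl
      rw [hstep] at h
      obtain ⟨b', hb', -⟩ := m2go k1 t x
      rw [hb'] at h
      exact absurd h (by simp)
  · intro h; subst h; rfl

-- ---- the initialisation fold of A ----
def entI (c : List (List (Int × Int))) (st0 : List Int) (i : Nat) : Int × Nat × Int :=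
  (-(st0.getD i 0 - gstA (c.getD i []) 2), i, 2)

theorem initA_fst (c : List (List (Int × Int))) (st0 : List Int) (l : List Nat) :
    ∀ (tg : List (Int × Nat × Int)) (st1 : List Int),
      tg.Pairwise (fun a b => entryLE a b = true) →
      ((l.foldl (initStepA c st0) (tg, st1)).1.Pairwise (fun a b => entryLE a b = true) ∧
       (l.foldl (initStepA c st0) (tg, st1)).1.Perm
         ((l.filter (fun i => !(st0.getD i 0 == 0))).map (entI c st0) ++ tg)) := by
  induction l with
  | nil => intro tg st1 h; exact ⟨h, by simp⟩
  | cons i l ih =>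
    intro tg st1 h
    rw [List.foldl_cons]
    by_cases hz : st0.getD i 0 = 0
    · have hstep : initStepA c st0 (tg, st1) i = (tg, st1) := by
        simp only [initStepA, if_pos hz]
      have hf : List.filter (fun i => !(st0.getD i 0 == 0)) (i :: l) =
          List.filter (fun i => !(st0.getD i 0 == 0)) l := by
        have hb : (!(st0.getD i 0 == 0)) = false := by simpa using hz
        rw [List.filter_cons, hb]; simp
      rw [hstep, hf]
      exact ih tg st1 h
    · have hstep : initStepA c st0 (tg, st1) i =
          (insortBy entryLE tg (entI c st0 i), st1.set i (gstA (c.getD i []) 2)) := by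
        simp only [initStepA, if_neg hz, entI]
      have hf : List.filter (fun i => !(st0.getD i 0 == 0)) (i :: l) =
          i :: List.filter (fun i => !(st0.getD i 0 == 0)) l := by
        have hb : (!(st0.getD i 0 == 0)) = true := by simpa using hz
        rw [List.filter_cons, hb]; simp
      rw [hstep, hf, List.map_cons]
      obtain ⟨h1, h2⟩ := ih (insortBy entryLE tg (entI c st0 i)) (st1.set i (gstA (c.getD i []) 2))
        (insortBy_pairwise entryLE_trans entryLE_total h)
      refine ⟨h1, ?_⟩
      have hmid : ((l.filter (fun i => !(st0.getD i 0 == 0))).map (entI c st0) ++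
          (entI c st0 i :: tg)).Perm
          (entI c st0 i :: ((l.filter (fun i => !(st0.getD i 0 == 0))).map (entI c st0) ++ tg)) :=
        List.perm_middle
      have h3 : ((l.filter (fun i => !(st0.getD i 0 == 0))).map (entI c st0) ++
          insortBy entryLE tg (entI c st0 i)).Perm
          ((l.filter (fun i => !(st0.getD i 0 == 0))).map (entI c st0) ++ (entI c st0 i :: tg)) :=
        List.Perm.append_left _ (insortBy_perm entryLE tg (entI c st0 i))
      exact (h2.trans h3).trans hmid

theorem initA_snd (c : List (List (Int × Int))) (st0 : List Int) (l : List Nat) :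
    ∀ (tg : List (Int × Nat × Int)) (st1 : List Int),
      (l.foldl (initStepA c st0) (tg, st1)).2 =
        l.foldl (fun st1 i => if st0.getD i 0 = 0 then st1
          else st1.set i (gstA (c.getD i []) 2)) st1 := by
  induction l with
  | nil => intro tg st1; rfl
  | cons i l ih =>
    intro tg st1
    rw [List.foldl_cons, List.foldl_cons]
    by_cases hz : st0.getD i 0 = 0
    · have hstep : initStepA c st0 (tg, st1) i = (tg, st1) := by
        simp only [initStepA, if_pos hz]
      rw [hstep, if_pos hz]
      exact ih tg st1
    · have hstep : initStepA c st0 (tg, st1) i =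
          (insortBy entryLE tg (entI c st0 i), st1.set i (gstA (c.getD i []) 2)) := by
        simp only [initStepA, if_neg hz, entI]
      rw [hstep, if_neg hz]
      exact ih _ _

theorem setFold_length (c : List (List (Int × Int))) (st0 : List Int) (l : List Nat)
    (st1 : List Int) :
    (l.foldl (fun st1 i => if st0.getD i 0 = 0 then st1
      else st1.set i (gstA (c.getD i []) 2)) st1).length = st1.length := by
  induction l generalizing st1 with
  | nil => rfl
  | cons i l ih =>
    rw [List.foldl_cons]
    by_cases hz : st0.getD i 0 = 0
    · rw [if_pos hz]; exact ih st1
    · rw [if_neg hz, ih]; exact List.length_set ..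

theorem setFold_getD (c : List (List (Int × Int))) (st0 : List Int) (l : List Nat) :
    ∀ (st1 : List Int) (j : Nat), j < st1.length →
      (l.foldl (fun st1 i => if st0.getD i 0 = 0 then st1
        else st1.set i (gstA (c.getD i []) 2)) st1).getD j 0 =
      if j ∈ l ∧ ¬(st0.getD j 0 = 0) then gstA (c.getD j []) 2 else st1.getD j 0 := by
  induction l with
  | nil => intro st1 j hj; simp
  | cons i l ih =>
    intro st1 j hj
    rw [List.foldl_cons]
    by_cases hz : st0.getD i 0 = 0
    · rw [if_pos hz]
      rw [ih st1 j hj]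
      by_cases hmem : j ∈ l ∧ ¬(st0.getD j 0 = 0)
      · rw [if_pos hmem, if_pos ⟨List.mem_cons_of_mem i hmem.1, hmem.2⟩]
      · rw [if_neg hmem, if_neg (by
          rintro ⟨hj1, hj2⟩
          rcases List.mem_cons.1 hj1 with rfl | hj1
          · exact hj2 hz
          · exact hmem ⟨hj1, hj2⟩)]
    · rw [if_neg hz]
      rw [ih _ j (by rw [List.length_set]; exact hj)]
      by_cases hmem : j ∈ l ∧ ¬(st0.getD j 0 = 0)
      · rw [if_pos hmem, if_pos ⟨List.mem_cons_of_mem i hmem.1, hmem.2⟩]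
      · rw [if_neg hmem]
        by_cases hij : j = i
        · subst hij
          rw [getD_set_self hj, if_pos ⟨List.mem_cons_self, hz⟩]
        · rw [getD_set_ne hij, if_neg (by
            rintro ⟨hj1, hj2⟩
            rcases List.mem_cons.1 hj1 with rfl | hj1
            · exact hij rfl
            · exact hmem ⟨hj1, hj2⟩)]

-- ---- the main greedy loop ----
def entE (cur nxt cnt : List Int) (i : Nat) : Int × Nat × Int :=
  (-(cur.getD i 0 - nxt.getD i 0), i, cnt.getD i 0)

theorem loop_eq (c : List (List (Int × Int))) (active : List Nat) (K : Nat)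
    (hnd : active.Nodup) (hltK : ∀ i ∈ active, i < K) :
    ∀ (f : Nat) (tg : List (Int × Nat × Int)) (cur nxt cnt : List Int),
      cur.length = K → nxt.length = K → cnt.length = K →
      (∀ i ∈ active, 0 ≤ cnt.getD i 0) →
      tg.Pairwise (fun a b => entryLE a b = true) →
      tg.Perm (active.map (entE cur nxt cnt)) →
      (loopA c f tg cur nxt).2.1 = (loopB c f active cur nxt cnt).1 := by
  intro f
  induction f with
  | zero => intro tg cur nxt cnt _ _ _ _ _ _; rfl
  | succ f ih =>
    intro tg cur nxt cnt hcl hnl hctl hcnt hpw hperm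
    cases tg with
    | nil =>
      have ha : active = [] := by
        have hm := hperm.length_eq
        simp only [List.length_nil] at hm
        exact List.map_eq_nil_iff.1 (List.eq_nil_of_length_eq_zero hm.symm)
      have hmin : PySem.List.min2? active
          (fun i => -(cur.getD i 0 - nxt.getD i 0)) (fun i => i) = none :=
        (min2?_none_iff _ _).2 ha
      show (loopA c (f+1) [] cur nxt).2.1 = (loopB c (f+1) active cur nxt cnt).1
      rw [loopA, loopB, hmin]
    | cons e tg' =>
      obtain ⟨g, i, m⟩ := e
      have hane : active ≠ [] := by
        intro h
        subst h
        simpa using hperm.length_eq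
      obtain ⟨b, hb⟩ : ∃ b, PySem.List.min2? active
          (fun i => -(cur.getD i 0 - nxt.getD i 0)) (fun i => i) = some b := by
        cases hmin : PySem.List.min2? active
            (fun i => -(cur.getD i 0 - nxt.getD i 0)) (fun i => i) with
        | none => exact absurd ((min2?_none_iff _ _).1 hmin) hane
        | some b => exact ⟨b, rfl⟩
      obtain ⟨hbmem, hbmin⟩ := min2?_spec _ _ _ hb
      have hbK : b < K := hltK b hbmem
      have hmin_e : ∀ a ∈ active.map (entE cur nxt cnt), entryLE (g, i, m) a = true :=
        fun a ha => pairwise_head_le entryLE_refl hpw a (hperm.mem_iff.2 ha)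
      have hble : ∀ j' ∈ active,
          entryLE (entE cur nxt cnt b) (entE cur nxt cnt j') = true := by
        intro j' hj'
        by_cases hbj : j' = b
        · subst hbj; exact entryLE_refl _
        · have h2 := hbmin j' hj'
          simp only [le2] at h2
          unfold entE entryLE
          simp only [Bool.or_eq_true, Bool.and_eq_true, decide_eq_true_eq]
          omega
      have heq : (g, i, m) = entE cur nxt cnt b := by
        apply entryLE_antisymm
        · exact hmin_e _ (List.mem_map_of_mem hbmem)
        · obtain ⟨j, hj, hje⟩ := List.mem_map.1 (hperm.subset List.mem_cons_self)
          rw [← hje]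
          exact hble j hj
      have hgije : g = -(cur.getD b 0 - nxt.getD b 0) ∧ i = b ∧ m = cnt.getD b 0 := by
        unfold entE at heq
        exact ⟨congrArg Prod.fst heq, congrArg (fun p => p.2.1) heq, congrArg (fun p => p.2.2) heq⟩
      obtain ⟨hg, hi, hm⟩ := hgije
      subst hg; subst hi; subst hm
      have hcnt0 : 0 ≤ cnt.getD i 0 := hcnt i hbmem
      have hs : gstA (c.getD i []) (cnt.getD i 0 + 1) = gstB (c.getD i []) (cnt.getD i 0 + 1) :=
        gstA_eq_gstB _ _ (by omega)
      have hA : loopA c (f + 1)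
          ((-(cur.getD i 0 - nxt.getD i 0), i, cnt.getD i 0) :: tg') cur nxt =
          loopA c f (insortBy entryLE tg'
              (-(nxt.getD i 0 - gstB (c.getD i []) (cnt.getD i 0 + 1)), i, cnt.getD i 0 + 1))
            (cur.set i (nxt.getD i 0))
            (nxt.set i (gstB (c.getD i []) (cnt.getD i 0 + 1))) := by
        rw [loopA]
        simp only [← hs]
      have hB : loopB c (f + 1) active cur nxt cnt =
          loopB c f active (cur.set i (nxt.getD i 0))
            (nxt.set i (gstB (c.getD i []) (cnt.getD i 0 + 1)))
            (cnt.set i (cnt.getD i 0 + 1)) := by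
        rw [loopB, hb]
      rw [hA, hB]
      -- names for the old and new states
      have hbc : i < cur.length := by omega
      have hbn : i < nxt.length := by omega
      have hbt : i < cnt.length := by omega
      have hnewb : entE (cur.set i (nxt.getD i 0))
          (nxt.set i (gstB (c.getD i []) (cnt.getD i 0 + 1)))
          (cnt.set i (cnt.getD i 0 + 1)) i =
          (-(nxt.getD i 0 - gstB (c.getD i []) (cnt.getD i 0 + 1)), i, cnt.getD i 0 + 1) := by
        unfold entE
        rw [getD_set_self hbc, getD_set_self hbn, getD_set_self hbt]
      have hnewj : ∀ j ∈ active.erase i, entE (cur.set i (nxt.getD i 0))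
          (nxt.set i (gstB (c.getD i []) (cnt.getD i 0 + 1)))
          (cnt.set i (cnt.getD i 0 + 1)) j = entE cur nxt cnt j := by
        intro j hj
        have hjb : j ≠ i := by
          intro h; subst h
          exact (hnd.not_mem_erase) hj
        unfold entE
        rw [getD_set_ne hjb, getD_set_ne hjb, getD_set_ne hjb]
      have h1 : tg'.Perm ((active.map (entE cur nxt cnt)).erase (entE cur nxt cnt i)) := by
        have h1' := hperm.erase (entE cur nxt cnt i)
        rwa [show ((-(cur.getD i 0 - nxt.getD i 0), i, cnt.getD i 0) :: tg') =
          entE cur nxt cnt i :: tg' from rfl, List.erase_cons_head] at h1'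
      have hae : active.Perm (i :: active.erase i) := List.perm_cons_erase hbmem
      have h3 : ((active.map (entE cur nxt cnt)).erase (entE cur nxt cnt i)).Perm
          ((active.erase i).map (entE cur nxt cnt)) := by
        have h2 := (hae.map (entE cur nxt cnt)).erase (entE cur nxt cnt i)
        rwa [List.map_cons, List.erase_cons_head] at h2
      have hmapnew : ((active.map (entE (cur.set i (nxt.getD i 0))
          (nxt.set i (gstB (c.getD i []) (cnt.getD i 0 + 1)))
          (cnt.set i (cnt.getD i 0 + 1))))).Perm
          ((-(nxt.getD i 0 - gstB (c.getD i []) (cnt.getD i 0 + 1)), i, cnt.getD i 0 + 1)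
            :: (active.erase i).map (entE cur nxt cnt)) := by
        have h4 := hae.map (entE (cur.set i (nxt.getD i 0))
          (nxt.set i (gstB (c.getD i []) (cnt.getD i 0 + 1)))
          (cnt.set i (cnt.getD i 0 + 1)))
        rw [List.map_cons, hnewb, List.map_congr_left hnewj] at h4
        exact h4
      apply ih
      · rw [List.length_set]; exact hcl
      · rw [List.length_set]; exact hnl
      · rw [List.length_set]; exact hctl
      · intro j hj
        by_cases hjb : j = i
        · subst hjb; rw [getD_set_self hbt]; omega
        · rw [getD_set_ne hjb]; exact hcnt j hj
      · exact insortBy_pairwise entryLE_trans entryLE_total (List.pairwise_cons.1 hpw).2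
      · exact (insortBy_perm _ _ _).trans
          (((h1.trans h3).cons _).trans hmapnew.symm)

theorem getD_replicate (K j : Nat) (v : Int) (h : j < K) :
    (List.replicate K v).getD j 0 = v := by
  rw [List.getD_eq_getElem?_getD]
  simp [h]

theorem getD_replicate_zero (K j : Nat) : (List.replicate K (0 : Int)).getD j 0 = 0 := by
  rw [List.getD_eq_getElem?_getD]
  simp [List.getElem?_replicate]
  split <;> rfl

theorem final_glue (c : List (List (Int × Int))) (K F : Nat) :
    ((loopA c F
        ((List.range K).foldl
          (initStepA c ((List.range K).map (fun i => gstA (c.getD i []) 1)))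
          ([], List.replicate K 0)).1
        ((List.range K).map (fun i => gstA (c.getD i []) 1))
        ((List.range K).foldl
          (initStepA c ((List.range K).map (fun i => gstA (c.getD i []) 1)))
          ([], List.replicate K 0)).2).2.1).sum =
    ((loopB c F
        ((List.range K).filter (fun i =>
          decide (0 < ((List.range K).map (fun i => gstB (c.getD i []) 1)).getD i 0)))
        ((List.range K).map (fun i => gstB (c.getD i []) 1))
        ((List.range K).map (fun i =>
          if ((List.range K).map (fun i => gstB (c.getD i []) 1)).getD i 0 = 0 then 0
          else gstB (c.getD i []) 2))
        (List.replicate K 2)).1).sum := by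
  have hst0 : ((List.range K).map (fun i => gstA (c.getD i []) 1)) =
      ((List.range K).map (fun i => gstB (c.getD i []) 1)) :=
    List.map_congr_left fun i _ => gstA_eq_gstB _ 1 (by norm_num)
  rw [hst0]
  set cur := (List.range K).map (fun i => gstB (c.getD i []) 1) with hcurdef
  set nxt := (List.range K).map (fun i =>
      if cur.getD i 0 = 0 then 0 else gstB (c.getD i []) 2) with hnxtdef
  set active := (List.range K).filter (fun i => decide (0 < cur.getD i 0)) with hactdef
  set p := (List.range K).foldl (initStepA c cur) ([], List.replicate K 0) with hpdef
  have hcurj : ∀ j, j < K → cur.getD j 0 = gstB (c.getD j []) 1 := by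
    intro j hj; rw [hcurdef, getD_map_range _ hj]
  have hnxtj : ∀ j, j < K → nxt.getD j 0 =
      (if cur.getD j 0 = 0 then 0 else gstB (c.getD j []) 2) := by
    intro j hj; rw [hnxtdef, getD_map_range _ hj]
  have hcurlen : cur.length = K := by rw [hcurdef]; simp
  have hnxtlen : nxt.length = K := by rw [hnxtdef]; simp
  have hactiveK : ∀ i ∈ active, i < K := by
    intro i hi
    rw [hactdef] at hi
    exact List.mem_range.1 (List.mem_of_mem_filter hi)
  have hactpos : ∀ i ∈ active, 0 < cur.getD i 0 := by
    intro i hi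
    rw [hactdef] at hi
    simpa using List.of_mem_filter hi
  -- A's initialisation fold
  obtain ⟨hpw, hperm0⟩ := initA_fst c cur (List.range K) [] (List.replicate K 0) List.Pairwise.nil
  -- filter predicates agree (standby times are nonnegative)
  have hfilter : (List.range K).filter (fun i => !(cur.getD i 0 == 0)) = active := by
    rw [hactdef]
    apply List.filter_congr
    intro i hi
    have hiK := List.mem_range.1 hi
    have hnn : 0 ≤ cur.getD i 0 := by rw [hcurj i hiK]; exact gstB_nonneg _ _
    by_cases hz : cur.getD i 0 = 0
    · simp only [hz]
      rfl
    · have hlt : 0 < cur.getD i 0 := by omega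
      have h1 : (cur.getD i 0 == 0) = false := beq_eq_false_iff_ne.2 hz
      rw [h1, decide_eq_true hlt]
      rfl
  -- the initial entries coincide
  have hents : active.map (entI c cur) = active.map (entE cur nxt (List.replicate K 2)) := by
    apply List.map_congr_left
    intro i hi
    have hiK := hactiveK i hi
    have hpos := hactpos i hi
    unfold entI entE
    have h2 : nxt.getD i 0 = gstB (c.getD i []) 2 := by
      rw [hnxtj i hiK, if_neg (by omega)]
    rw [h2, getD_replicate K i 2 hiK, gstA_eq_gstB _ 2 (by norm_num)]
  have hperm : p.1.Perm (active.map (entE cur nxt (List.replicate K 2))) := by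
    have := hperm0
    rw [List.append_nil, hfilter, hents] at this
    exact this
  -- A's standby_time_arr[1] equals B's nxt
  have hp2 : p.2 = nxt := by
    have hlen : p.2.length = K := by
      rw [hpdef, initA_snd, setFold_length]
      simp
    apply List.ext_getElem (by rw [hlen, hnxtlen])
    intro j hj hj2
    have hjK : j < K := by rw [hlen] at hj; exact hj
    have hrep : j < (List.replicate K (0 : Int)).length := by simp [hjK]
    have h1 : p.2.getD j 0 = if j ∈ List.range K ∧ ¬(cur.getD j 0 = 0)
        then gstA (c.getD j []) 2 else (List.replicate K (0 : Int)).getD j 0 := by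
      rw [hpdef, initA_snd, setFold_getD c cur (List.range K) _ j hrep]
    rw [← List.getD_eq_getElem _ 0 hj, ← List.getD_eq_getElem _ 0 hj2, h1,
      hnxtj j hjK, getD_replicate_zero]
    by_cases hz : cur.getD j 0 = 0
    · rw [if_neg (by rintro ⟨-, hx⟩; exact hx hz), if_pos hz]
    · rw [if_pos ⟨List.mem_range.2 hjK, hz⟩, if_neg hz,
        gstA_eq_gstB _ 2 (by norm_num)]
  rw [hp2]
  congr 1
  exact loop_eq c active K ((List.nodup_range).filter _) hactiveK F p.1 cur nxt
    (List.replicate K 2) hcurlen hnxtlen (by simp)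
    (fun i hi => by rw [getD_replicate K i 2 (hactiveK i hi)]; norm_num)
    hpw hperm

-- ===== VERDICT (by name: the statement is the Claim_ definition above) =====
theorem solution_spec : Claim_equal_solution := by
  intro k n reqs _ _
  show solution k n reqs = solution_alt k n reqs
  unfold solution solution_alt
  exact final_glue (buildCounsel k reqs) k.toNat (n - k).toNat
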